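-- pv_equiv track=rewrite | github.com/lenhatquang97/PL_Resolution_AI | PS4/src/algorithms.py | isEqualUsedOnlyOr
-- ===== SOURCE A (Python) =====
-- def isEqualUsedOnlyOr(val1: str, val2: str) -> bool:
--     arr1 = val1.split(" OR ")
--     arr2 = val2.split(" OR ")
--     arr1.sort()
--     arr2.sort()
--     if len(arr1) != len(arr2): return False
--     for (a,b) in zip(arr1, arr2):
--         if a != b:
--             return False
--     return True
-- ===== SOURCE B (Python) =====
-- def isEqualUsedOnlyOr(val1: str, val2: str) -> bool:
--     arr1 = val1.split(" OR ")
--     arr2 = val2.split(" OR ")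
--     return all(arr1.count(x) == arr2.count(x) for x in arr1 + arr2)
-- ===== Notes on version B (the rewrite author's own statement) =====
-- stated objective: alternative
-- what changed: B drops the sort and the pairwise zip loop entirely and decides multiset equality of the ' OR '-separated terms by comparing occurrence counts of every term instead.
import Mathlib
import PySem

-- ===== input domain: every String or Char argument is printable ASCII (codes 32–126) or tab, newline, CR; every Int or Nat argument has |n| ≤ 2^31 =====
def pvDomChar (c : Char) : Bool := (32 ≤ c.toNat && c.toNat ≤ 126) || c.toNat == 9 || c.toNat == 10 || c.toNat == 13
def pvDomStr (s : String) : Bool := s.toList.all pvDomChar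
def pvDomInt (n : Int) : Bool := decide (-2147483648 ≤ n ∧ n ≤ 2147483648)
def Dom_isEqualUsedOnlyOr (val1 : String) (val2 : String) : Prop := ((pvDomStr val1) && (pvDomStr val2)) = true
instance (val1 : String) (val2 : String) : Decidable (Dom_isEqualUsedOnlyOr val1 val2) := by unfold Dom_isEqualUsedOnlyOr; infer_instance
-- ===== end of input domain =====

-- B replaces A's sort + pairwise zip loop by comparing occurrence counts of every split term (multiset equality); return-value equivalence only.

-- ===== PORT A =====
-- val.split(" OR "): sep is a nonempty literal, so Python's split never errors; PySem.Str.split? is none only for sep = ""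
def pvSplit (s : String) : List String := (PySem.Str.split? s " OR ").getD []

-- the 'for (a,b) in zip(...): if a != b: return False' loop of A
def pvZipLoop : List (String × String) → Bool
  | [] => true
  | (a, b) :: rest => if a ≠ b then false else pvZipLoop rest

def isEqualUsedOnlyOr (val1 : String) (val2 : String) : Bool :=
  let arr1 := pvSplit val1
  let arr2 := pvSplit val2
  let arr1 := PySem.List.sorted arr1 (fun x => x) false
  let arr2 := PySem.List.sorted arr2 (fun x => x) false
  if arr1.length ≠ arr2.length then false
  else pvZipLoop (arr1.zip arr2)

-- ===== PORT B =====
def isEqualUsedOnlyOr_alt (val1 : String) (val2 : String) : Bool :=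
  let arr1 := pvSplit val1
  let arr2 := pvSplit val2
  (arr1 ++ arr2).all (fun x => PySem.List.count arr1 x == PySem.List.count arr2 x)

-- ===== PRECONDITION & SPEC =====
def Spec_isEqualUsedOnlyOr (val1 : String) (val2 : String) (out : Bool) : Prop := out = isEqualUsedOnlyOr_alt val1 val2
instance (val1 : String) (val2 : String) (out : Bool) : Decidable (Spec_isEqualUsedOnlyOr val1 val2 out) := by unfold Spec_isEqualUsedOnlyOr; infer_instance

-- ===== CLAIM (what is proved, stated in full; the proofs are below) =====
def Claim_equal_isEqualUsedOnlyOr : Prop := ∀ (val1 : String) (val2 : String), Dom_isEqualUsedOnlyOr val1 val2 → Spec_isEqualUsedOnlyOr val1 val2 (isEqualUsedOnlyOr val1 val2)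

-- ===== LEMMAS AND PROOFS =====

theorem pvZipLoop_eq_true_iff (l1 l2 : List String) (h : l1.length = l2.length) :
    pvZipLoop (l1.zip l2) = true ↔ l1 = l2 := by
  induction l1 generalizing l2 with
  | nil => cases l2 with
    | nil => simp [pvZipLoop]
    | cons b t => simp at h
  | cons a t ih => cases l2 with
    | nil => simp at h
    | cons b t2 =>
      simp only [List.zip_cons_cons, pvZipLoop]
      by_cases hab : a = b
      · subst hab
        simp only [List.length_cons, Nat.add_right_cancel_iff] at h
        simp [ih t2 h]
      · simp [hab]

theorem portA_eq_true_iff (l1 l2 : List String) :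
    ((if (PySem.List.sorted l1 (fun x => x) false).length ≠ (PySem.List.sorted l2 (fun x => x) false).length then false
      else pvZipLoop ((PySem.List.sorted l1 (fun x => x) false).zip (PySem.List.sorted l2 (fun x => x) false))) = true)
    ↔ l1.Perm l2 := by
  rw [← PySem.List.sorted_id_eq_sorted_id_iff_perm]
  split_ifs with hlen
  · constructor
    · intro h; exact absurd h (by simp)
    · intro h; exact absurd (by rw [h]) hlen
  · rw [not_not] at hlen
    rw [pvZipLoop_eq_true_iff _ _ hlen]

theorem portB_eq_true_iff (l1 l2 : List String) :
    ((l1 ++ l2).all (fun x => PySem.List.count l1 x == PySem.List.count l2 x) = true)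
    ↔ l1.Perm l2 := by
  rw [List.all_eq_true]
  constructor
  · intro h
    rw [List.perm_iff_count]
    intro x
    by_cases hx : x ∈ l1 ++ l2
    · have := h x hx
      simpa [PySem.List.count] using this
    · simp only [List.mem_append, not_or] at hx
      rw [List.count_eq_zero_of_not_mem hx.1, List.count_eq_zero_of_not_mem hx.2]
  · intro h x _
    simp [PySem.List.count, List.perm_iff_count.mp h x]

-- ===== VERDICT (by name: the statement is the Claim_ definition above) =====
theorem isEqualUsedOnlyOr_spec : Claim_equal_isEqualUsedOnlyOr := by
  intro val1 val2 _
  unfold Spec_isEqualUsedOnlyOr isEqualUsedOnlyOr isEqualUsedOnlyOr_alt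
  simp only []
  rw [Bool.eq_iff_iff]
  rw [portA_eq_true_iff, portB_eq_true_iff]
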